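-- pv_equiv track=rewrite | github.com/cornelltech/winternship-matching | filter.py | assess_results
-- ===== SOURCE A (Python) =====
-- def get_score(results):
--     total = 0
--     for k in results.keys():
--         total += (k * results[k])
--     return total
--
-- def assess_results(students, company_profiles):
--     score = {}
--     for company in company_profiles:
--         results = {}
--         for student in students:
--             match = student[company]
--             if match in results:
--                 results[match] += 1
--             else:
--                 results[match] = 0
--         score[company] = get_score(results)
--         # score[company] = get_number_of_compatible_students(results)
--     return score
-- ===== SOURCE B (Python) =====
-- def assess_results(students, company_profiles):
--     # Sort-then-scan: the original's score is sum of k*(count(k)-1), i.e. the sum of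
--     # every occurrence of a value beyond its first; after sorting, those are exactly
--     # the elements equal to their predecessor.
--     score = {}
--     for company in company_profiles:
--         vals = sorted(student[company] for student in students)
--         s = 0
--         prev = None
--         for v in vals:
--             if v == prev:
--                 s += v
--             prev = v
--         score[company] = s
--     return score
-- ===== Notes on version B (the rewrite author's own statement) =====
-- stated objective: alternative
-- what changed: Detects duplicates by sorting instead of hashing: per company it sorts the match values and sums every element equal to its predecessor in one adjacent scan, with no count dictionary, no set and no second summation over keys.
import Mathlib
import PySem

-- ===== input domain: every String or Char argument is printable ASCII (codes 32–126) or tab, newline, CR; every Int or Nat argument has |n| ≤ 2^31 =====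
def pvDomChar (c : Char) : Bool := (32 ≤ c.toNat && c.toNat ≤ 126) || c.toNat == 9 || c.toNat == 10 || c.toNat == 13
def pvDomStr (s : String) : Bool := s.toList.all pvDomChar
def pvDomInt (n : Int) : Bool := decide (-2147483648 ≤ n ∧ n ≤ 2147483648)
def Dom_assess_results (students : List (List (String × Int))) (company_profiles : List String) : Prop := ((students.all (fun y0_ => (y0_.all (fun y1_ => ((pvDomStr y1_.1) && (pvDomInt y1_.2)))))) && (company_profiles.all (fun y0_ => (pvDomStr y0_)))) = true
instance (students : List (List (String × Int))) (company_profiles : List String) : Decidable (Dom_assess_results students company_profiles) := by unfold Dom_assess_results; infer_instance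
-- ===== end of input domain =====

-- ===== PORT A =====
-- B detects duplicate match values by sorting and an adjacent scan instead of a
-- per-value count dictionary plus a summation over its keys (objective: alternative).
-- get_score(results) = sum over keys k of k * results[k]
def get_score (results : PySem.Dict Int Int) : Int :=
  results.keys.foldl (fun total k => total + k * results.getD k 0) 0

def assess_results (students : List (List (String × Int))) (company_profiles : List String) : List (String × Int) :=
  (company_profiles.foldl (fun score company =>
    let results := students.foldl (fun results student =>
      let m := ((PySem.Dict.ofList student).get? company).getD 0  -- none = KeyError, excluded by Pre_
      if results.contains m then results.modify m 0 (· + 1)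
      else results.insert m 0) PySem.Dict.empty
    score.insert company (get_score results)) (PySem.Dict.empty : PySem.Dict String Int)).items

-- ===== PORT B =====
def assess_results_alt (students : List (List (String × Int))) (company_profiles : List String) : List (String × Int) :=
  (company_profiles.foldl (fun score company =>
    let vals := PySem.List.sorted (students.map (fun student =>
      ((PySem.Dict.ofList student).get? company).getD 0)) (fun x => x) false  -- none = KeyError, excluded by Pre_
    let st := vals.foldl (fun (acc : Int × Option Int) v =>
      ((if some v == acc.2 then acc.1 + v else acc.1), some v)) ((0 : Int), (none : Option Int))
    score.insert company st.1) (PySem.Dict.empty : PySem.Dict String Int)).items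

-- ===== PRECONDITION & SPEC =====
-- Pre_: every listed company is a key of every student dict (otherwise Python raises KeyError).
def Pre_assess_results (students : List (List (String × Int))) (company_profiles : List String) : Prop :=
  ∀ company ∈ company_profiles, ∀ student ∈ students, (PySem.Dict.ofList student).contains company = true
instance (students : List (List (String × Int))) (company_profiles : List String) : Decidable (Pre_assess_results students company_profiles) := by unfold Pre_assess_results; infer_instance
def pvWitness_assess_results : (List (List (String × Int))) × List String :=
  ([[("a", 2), ("b", 3)], [("a", 2), ("b", 5)]], ["a", "b"])
def Spec_assess_results (students : List (List (String × Int))) (company_profiles : List String) (out : List (String × Int)) : Prop := out = assess_results_alt students company_profiles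
instance (students : List (List (String × Int))) (company_profiles : List String) (out : List (String × Int)) : Decidable (Spec_assess_results students company_profiles out) := by unfold Spec_assess_results; infer_instance

-- ===== CLAIM (what is proved, stated in full; the proofs are below) =====
def Claim_equal_assess_results : Prop := ∀ (students : List (List (String × Int))) (company_profiles : List String), Dom_assess_results students company_profiles → Pre_assess_results students company_profiles → Spec_assess_results students company_profiles (assess_results students company_profiles)

-- ===== LEMMAS AND PROOFS =====

lemma get_score_eq_sum (d : PySem.Dict Int Int) :
    get_score d = (d.keys.map (fun k => k * d.getD k 0)).sum := by
  unfold get_score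
  rw [PySem.List.foldl_add]
  simp

-- bumping the count at a present key m raises get_score by exactly m
lemma sum_map_bump (keys : List Int) (d : PySem.Dict Int Int) (m : Int)
    (hnd : keys.Nodup) (hm : m ∈ keys) :
    (keys.map (fun k => k * (d.insert m (d.getD m 0 + 1)).getD k 0)).sum
      = (keys.map (fun k => k * d.getD k 0)).sum + m := by
  induction keys with
  | nil => cases hm
  | cons x xs ih =>
    rcases List.nodup_cons.mp hnd with ⟨hx, hxs⟩
    simp only [List.map_cons, List.sum_cons]
    rcases List.mem_cons.mp hm with rfl | hm'
    · rw [PySem.Dict.getD_insert_self]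
      have : xs.map (fun k => k * (d.insert m (d.getD m 0 + 1)).getD k 0)
           = xs.map (fun k => k * d.getD k 0) := by
        apply List.map_congr_left
        intro a ha
        rw [PySem.Dict.getD_insert_of_ne d _ 0 (by rintro rfl; exact hx ha)]
      rw [this]; ring
    · have hxm : x ≠ m := fun h => hx (h ▸ hm')
      rw [PySem.Dict.getD_insert_of_ne d _ 0 hxm, ih hxs hm']
      ring

-- A's inner loop: the count dict stores count-1 per distinct value, so its score is
-- (sum of all values) minus (sum of the distinct values)
lemma inner_A (ms : List Int) (d : PySem.Dict Int Int) (tot : Int) (s : PySem.Set Int)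
    (hkeys : s = d.keys) (hnd : d.keys.Nodup) (htot : tot = get_score d + s.sum) :
    get_score (ms.foldl (fun r m => if r.contains m then r.modify m 0 (· + 1) else r.insert m 0) d)
      = (tot + ms.sum) - (ms.foldl PySem.Set.add s).sum := by
  induction ms generalizing d tot s with
  | nil =>
    simp only [List.foldl_nil, List.sum_nil]
    omega
  | cons m ms ih =>
    simp only [List.foldl_cons, List.sum_cons]
    by_cases hc : d.contains m = true
    · rw [if_pos hc]
      have hmem : m ∈ d.keys := (PySem.Dict.contains_iff_mem_keys d m).mp hc
      have hadd : PySem.Set.add s m = s := by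
        simp [PySem.Set.add, PySem.Set.contains, hkeys, hmem]
      rw [hadd]
      have hk : (d.modify m 0 (· + 1)).keys = d.keys := by
        rw [PySem.Dict.keys_modify, PySem.Dict.keys_insert_of_contains d _ hc]
      rw [ih (d.modify m 0 (· + 1)) (tot + m) s (by rw [hkeys, hk]) (by rw [hk]; exact hnd) ?_]
      · ring_nf
      · rw [get_score_eq_sum, hk]
        have : (d.modify m 0 (· + 1)) = d.insert m (d.getD m 0 + 1) := rfl
        rw [this, sum_map_bump d.keys d m hnd hmem, ← get_score_eq_sum]
        omega
    · have hc' : d.contains m = false := by simpa using hc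
      rw [if_neg (by simp [hc'])]
      have hnm : m ∉ d.keys := fun h => by
        rw [(PySem.Dict.contains_iff_mem_keys d m).mpr h] at hc'; cases hc'
      have hmem' : m ∉ s := by rw [hkeys]; exact hnm
      have hadd : PySem.Set.add s m = s ++ [m] := by
        simp [PySem.Set.add, PySem.Set.contains, hmem']
      have hkeys' : (d.insert m 0).keys = d.keys ++ [m] :=
        PySem.Dict.keys_insert_of_not_contains d 0 hc'
      rw [hadd]
      rw [ih (d.insert m 0) (tot + m) (s ++ [m]) (by rw [hkeys, hkeys']) ?_ ?_]
      · ring_nf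
      · rw [hkeys']
        exact List.nodup_append.mpr ⟨hnd, List.nodup_singleton m, by intro a ha b hb; rw [List.mem_singleton] at hb; subst hb; rintro rfl; exact hnm ha⟩
      · rw [get_score_eq_sum, hkeys', List.map_append, List.sum_append, List.sum_append]
        have : d.keys.map (fun k => k * (d.insert m 0).getD k 0)
             = d.keys.map (fun k => k * d.getD k 0) := by
          apply List.map_congr_left
          intro a ha
          rw [PySem.Dict.getD_insert_of_ne d _ 0 (by rintro rfl; exact hnm ha)]
        rw [this, ← get_score_eq_sum]
        simp [PySem.Dict.getD_insert_self]
        omega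

-- Finset identity: ∑ over insert v S = v + ∑ over S.erase v
lemma sum_insert_erase (S : Finset Int) (v : Int) :
    ∑ x ∈ insert v S, x = v + ∑ x ∈ S.erase v, x := by
  by_cases hv : v ∈ S
  · rw [Finset.insert_eq_self.mpr hv, ← Finset.add_sum_erase S _ hv]
  · rw [Finset.erase_eq_of_notMem hv, Finset.sum_insert hv]

-- B's adjacent scan over a sorted suffix whose elements all dominate the previous value
lemma scan_sorted (l : List Int) (s p : Int)
    (hp : ∀ x ∈ l, p ≤ x) (hs : l.Pairwise (· ≤ ·)) :
    (l.foldl (fun (acc : Int × Option Int) v =>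
        ((if some v == acc.2 then acc.1 + v else acc.1), some v)) (s, some p)).1
      = s + l.sum - ∑ x ∈ l.toFinset.erase p, x := by
  induction l generalizing s p with
  | nil => simp
  | cons v rest ih =>
    rcases List.pairwise_cons.mp hs with ⟨hv, hrest⟩
    simp only [List.foldl_cons, List.sum_cons, List.toFinset_cons]
    by_cases hvp : v = p
    · subst hvp
      rw [if_pos (by simp)]
      rw [ih (s + v) v hv hrest]
      rw [Finset.erase_insert_eq_erase]; ring_nf
    · rw [if_neg (by simp [hvp])]
      rw [ih s v hv hrest]
      have hpv : p < v := lt_of_le_of_ne (hp v (List.mem_cons_self)) (Ne.symm hvp)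
      have hpnot : p ∉ insert v rest.toFinset := by
        simp only [Finset.mem_insert, List.mem_toFinset]
        rintro (rfl | hmem)
        · exact hvp rfl
        · exact absurd (hv p hmem) (by omega)
      rw [Finset.erase_eq_of_notMem hpnot, sum_insert_erase]
      ring_nf

-- the full B scan from (0, none) equals (sum of all values) - (sum of the distinct values)
lemma scan_full (l : List Int) (hs : l.Pairwise (· ≤ ·)) :
    (l.foldl (fun (acc : Int × Option Int) v =>
        ((if some v == acc.2 then acc.1 + v else acc.1), some v)) ((0 : Int), (none : Option Int))).1
      = l.sum - ∑ x ∈ l.toFinset, x := by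
  cases l with
  | nil => simp
  | cons v rest =>
    rcases List.pairwise_cons.mp hs with ⟨hv, hrest⟩
    simp only [List.foldl_cons, List.sum_cons, List.toFinset_cons]
    rw [if_neg (by simp)]
    rw [scan_sorted rest 0 v hv hrest, sum_insert_erase]
    ring_nf

-- sum of a PySem.Set built from ms = ∑ over ms.toFinset
lemma ofList_sum (ms : List Int) : (PySem.Set.ofList ms).sum = ∑ x ∈ ms.toFinset, x := by
  have hnd : (PySem.Set.ofList ms).Nodup := PySem.Set.nodup_ofList ms
  have hfs : (PySem.Set.ofList ms).toFinset = ms.toFinset := by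
    ext a; simp [List.mem_toFinset, PySem.Set.mem_ofList]
  rw [← hfs, List.sum_toFinset _ hnd]
  simp

-- per company: A's score equals B's score
lemma per_company (ms : List Int) :
    get_score (ms.foldl (fun r m => if r.contains m then r.modify m 0 (· + 1) else r.insert m 0) PySem.Dict.empty)
      = ((PySem.List.sorted ms (fun x => x) false).foldl (fun (acc : Int × Option Int) v =>
          ((if some v == acc.2 then acc.1 + v else acc.1), some v)) ((0 : Int), (none : Option Int))).1 := by
  have hA := inner_A ms PySem.Dict.empty 0 PySem.Set.empty rfl (by simp) rfl
  have hperm : (PySem.List.sorted ms (fun x => x) false).Perm ms := PySem.List.sorted_perm ms _ _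
  have hB := scan_full (PySem.List.sorted ms (fun x => x) false)
    (PySem.List.sorted_pairwise ms (fun x => x))
  rw [hA, hB, hperm.sum_eq, List.toFinset_eq_of_perm _ _ hperm]
  have : ms.foldl PySem.Set.add PySem.Set.empty = PySem.Set.ofList ms := rfl
  rw [this, ofList_sum]
  ring_nf

-- ===== VERDICT (by name: the statement is the Claim_ definition above) =====
theorem assess_results_spec : Claim_equal_assess_results := by
  intro students company_profiles _ _
  unfold Spec_assess_results assess_results assess_results_alt
  refine congrArg PySem.Dict.items ?_
  apply PySem.List.foldl_congr_mem
  intro acc c _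
  simp only []
  congr 1
  have h := per_company (students.map (fun student => ((PySem.Dict.ofList student).get? c).getD 0))
  rw [List.foldl_map] at h
  exact h
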